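-- pv_equiv track=rewrite | github.com/marcelmildenberger/running-cocktail | main.py | compute_host_capacities
-- ===== SOURCE A (Python) =====
-- def compute_host_capacities(num_hosts: int, num_available_guests: int, default_per_host=2):
--     """
--     Verteilt die verfügbaren Gäste-Slots fair auf Hosts.
--     Rückgabe: Liste mit Kapazitäten (z.B. [2,2,2,...] oder [2,2,3,2,...])
--     Summe == num_available_guests
--     """
--     if num_hosts <= 0:
--         return []
--     base = num_available_guests // num_hosts
--     rem = num_available_guests % num_hosts
--
--     # In der Praxis soll base ≈ 2 sein
--     caps = [base] * num_hosts
--     for i in range(rem):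
--         caps[i] += 1  # ein paar Hosts bekommen +1 Gast
--     return caps
-- ===== SOURCE B (Python) =====
-- def compute_host_capacities(num_hosts: int, num_available_guests: int, default_per_host=2):
--     if num_hosts <= 0:
--         return []
--     return [(num_available_guests + num_hosts - 1 - i) // num_hosts
--             for i in range(num_hosts)]
-- ===== Notes on version B (the rewrite author's own statement) =====
-- stated objective: simpler
-- what changed: Replaces A's base/remainder two-phase (replicate base then a loop incrementing the first rem entries in place) by a single comprehension with the closed-form per-index value (N + H - 1 - i) // H, correct for negative N via floor division.
import Mathlib
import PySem

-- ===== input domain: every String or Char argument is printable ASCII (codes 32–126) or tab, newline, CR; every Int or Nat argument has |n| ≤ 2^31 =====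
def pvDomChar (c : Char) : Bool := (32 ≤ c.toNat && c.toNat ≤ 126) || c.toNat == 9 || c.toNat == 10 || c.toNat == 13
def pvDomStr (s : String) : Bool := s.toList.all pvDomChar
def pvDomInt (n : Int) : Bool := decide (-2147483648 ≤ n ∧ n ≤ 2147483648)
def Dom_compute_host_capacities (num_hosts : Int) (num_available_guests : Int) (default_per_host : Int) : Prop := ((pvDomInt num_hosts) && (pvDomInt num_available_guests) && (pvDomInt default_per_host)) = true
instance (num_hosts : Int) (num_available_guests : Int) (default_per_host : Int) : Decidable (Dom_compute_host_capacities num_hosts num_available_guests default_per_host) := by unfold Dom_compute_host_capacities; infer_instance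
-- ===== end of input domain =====

-- B replaces A's base/remainder two-phase (replicate then increment loop) by one
-- closed-form floor-division formula per index; objective: simpler, same cost.

-- ===== PORT A =====
def compute_host_capacities (num_hosts : Int) (num_available_guests : Int) (default_per_host : Int) : List Int :=
  if num_hosts ≤ 0 then []
  else
    let base := PySem.Int.floordiv num_available_guests num_hosts
    let rem := PySem.Int.mod num_available_guests num_hosts
    let caps := List.replicate num_hosts.toNat base
    (PySem.List.pyRange 0 rem 1).foldl
      (fun caps i => PySem.List.pySetD caps i (PySem.List.pyGetD caps i 0 + 1)) caps

-- ===== PORT B =====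
def compute_host_capacities_alt (num_hosts : Int) (num_available_guests : Int) (default_per_host : Int) : List Int :=
  if num_hosts ≤ 0 then []
  else
    (PySem.List.pyRange 0 num_hosts 1).map
      (fun i => PySem.Int.floordiv (num_available_guests + num_hosts - 1 - i) num_hosts)

-- ===== PRECONDITION & SPEC =====
def Spec_compute_host_capacities (num_hosts : Int) (num_available_guests : Int) (default_per_host : Int) (out : List Int) : Prop := out = compute_host_capacities_alt num_hosts num_available_guests default_per_host
instance (num_hosts : Int) (num_available_guests : Int) (default_per_host : Int) (out : List Int) : Decidable (Spec_compute_host_capacities num_hosts num_available_guests default_per_host out) := by unfold Spec_compute_host_capacities; infer_instance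

-- ===== CLAIM (what is proved, stated in full; the proofs are below) =====
def Claim_equal_compute_host_capacities : Prop := ∀ (num_hosts : Int) (num_available_guests : Int) (default_per_host : Int), Dom_compute_host_capacities num_hosts num_available_guests default_per_host → Spec_compute_host_capacities num_hosts num_available_guests default_per_host (compute_host_capacities num_hosts num_available_guests default_per_host)

-- ===== LEMMAS AND PROOFS =====

-- A's increment loop characterised: after the first r increments on [base]*n,
-- entry k is base+1 for k < r and base otherwise.
theorem incr_loop_eq (r n : Nat) (base : Int) (h : r ≤ n) :
    (PySem.List.pyRange 0 (r : Int) 1).foldl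
      (fun caps i => PySem.List.pySetD caps i (PySem.List.pyGetD caps i 0 + 1))
      (List.replicate n base)
    = (List.range n).map (fun k => if k < r then base + 1 else base) := by
  induction r with
  | zero =>
      rw [PySem.List.pyRange_one_eq_nil (by simp)]
      simp
  | succ r ih =>
      have hr : r ≤ n := Nat.le_of_succ_le h
      have hsplit : PySem.List.pyRange 0 ((r : Int) + 1) 1
          = PySem.List.pyRange 0 (r : Int) 1 ++ [(r : Int)] :=
        PySem.List.pyRange_one_succ_right (by positivity)
      rw [show ((r.succ : Nat) : Int) = (r : Int) + 1 by push_cast [Nat.succ_eq_add_one]; ring, hsplit,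
        List.foldl_append, ih hr]
      simp only [List.foldl_cons, List.foldl_nil]
      have hrn : r < n := h
      have hget : PySem.List.pyGetD ((List.range n).map (fun k => if k < r then base + 1 else base)) ((r : Nat) : Int) 0 = base := by
        rw [PySem.List.pyGetD_natCast]
        rw [List.getD_eq_getElem _ _ (by simpa using hrn)]
        simp
      rw [hget, PySem.List.pySetD_natCast]
      apply List.ext_getElem
      · simp
      · intro k hk1 hk2
        simp only [List.getElem_set, List.getElem_map, List.getElem_range]
        by_cases hkr : k = r
        · simp [hkr]
        · simp only [List.length_set, List.length_map, List.length_range] at hk1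
          rw [if_neg (by omega)]
          by_cases hlt : k < r
          · rw [if_pos hlt, if_pos (by omega)]
          · rw [if_neg hlt, if_neg (by omega)]

-- The closed form agrees pointwise with base/remainder.
theorem closed_form_eq (H N : Int) (hH : 0 < H) (i : Int) (h0 : 0 ≤ i) (hi : i < H) :
    PySem.Int.floordiv (N + H - 1 - i) H
    = PySem.Int.floordiv N H + (if i < PySem.Int.mod N H then 1 else 0) := by
  have hdm := PySem.Int.floordiv_mul_add_mod N H
  have hm0 := PySem.Int.mod_nonneg N (b := H) hH
  have hmH := PySem.Int.mod_lt N (b := H) hH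
  rw [PySem.Int.floordiv_eq_iff_of_pos hH]
  split_ifs with hlt
  · constructor <;> nlinarith
  · constructor <;> nlinarith

-- ===== VERDICT (by name: the statement is the Claim_ definition above) =====
theorem compute_host_capacities_spec : Claim_equal_compute_host_capacities := by
  intro H N D _
  unfold Spec_compute_host_capacities compute_host_capacities compute_host_capacities_alt
  by_cases hH : H ≤ 0
  · simp [hH]
  · have hHpos : 0 < H := lt_of_not_ge hH
    simp only [if_neg hH]
    have hr0 : 0 ≤ PySem.Int.mod N H := PySem.Int.mod_nonneg N hHpos
    have hrH : PySem.Int.mod N H < H := PySem.Int.mod_lt N hHpos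
    have hrepr : PySem.Int.mod N H = ((PySem.Int.mod N H).toNat : Int) := by omega
    rw [hrepr, incr_loop_eq _ H.toNat _ (by omega)]
    rw [PySem.List.pyRange_one]
    apply List.ext_getElem
    · simp
    · intro k hk1 hk2
      simp only [List.length_map, List.length_range] at hk1
      simp only [List.getElem_map, List.getElem_range, zero_add]
      rw [closed_form_eq H N hHpos (k : Int) (by positivity) (by omega)]
      split_ifs <;> omega
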